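-- pv_equiv track=rewrite | github.com/hdavis2100/Real-Time-Website-Analytics | jobs/stream_kafka.py | _group_records_by_run
-- ===== SOURCE A (Python) =====
-- from typing import Any
--
-- def _group_records_by_run(rows: list[dict[str, Any]]) -> dict[str, list[dict[str, Any]]]:
--     grouped: dict[str, list[dict[str, Any]]] = {}
--     for row in rows:
--         run_id = str(row.get("simulation_run_id") or "")
--         if not run_id:
--             continue
--         grouped.setdefault(run_id, []).append(row)
--     return grouped
-- ===== SOURCE B (Python) =====
-- def _group_records_by_run(rows):
--     def key(row):
--         return str(row.get("simulation_run_id") or "")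
--     keys = list(dict.fromkeys(k for k in map(key, rows) if k))
--     return {k: [row for row in rows if key(row) == k] for k in keys}
-- ===== Notes on version B (the rewrite author's own statement) =====
-- stated objective: alternative
-- what changed: B replaces the single-pass setdefault/append accumulation with a two-phase plan: first collect the ordered distinct non-empty run ids (dict.fromkeys), then build each group by an independent filter pass over the rows.
import Mathlib
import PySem

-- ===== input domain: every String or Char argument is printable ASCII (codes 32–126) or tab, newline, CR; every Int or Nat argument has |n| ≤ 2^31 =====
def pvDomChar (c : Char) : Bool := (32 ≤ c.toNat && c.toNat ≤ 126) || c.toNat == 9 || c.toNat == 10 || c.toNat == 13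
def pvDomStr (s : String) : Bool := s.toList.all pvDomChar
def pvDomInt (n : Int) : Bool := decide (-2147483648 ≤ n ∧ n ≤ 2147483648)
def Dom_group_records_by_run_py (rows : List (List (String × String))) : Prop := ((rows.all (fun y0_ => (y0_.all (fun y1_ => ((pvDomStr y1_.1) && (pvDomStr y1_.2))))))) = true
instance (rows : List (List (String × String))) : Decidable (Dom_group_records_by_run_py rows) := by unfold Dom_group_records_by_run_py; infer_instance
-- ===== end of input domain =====

-- B groups by first collecting the ordered distinct non-empty run ids and then filtering
-- the rows once per id, instead of A's single-pass setdefault/append accumulation (objective: alternative).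


-- str(row.get("simulation_run_id") or ""): first-match lookup; None and "" both normalize to "".
def pvRunId (row : List (String × String)) : String :=
  ((PySem.Dict.mk row).get? "simulation_run_id").getD ""

-- ===== PORT A =====
def group_records_by_run_py (rows : List (List (String × String))) : List (String × List (List (String × String))) :=
  (rows.foldl
    (fun grouped row =>
      let run_id := pvRunId row
      if run_id = "" then grouped
      else grouped.modify run_id [] (· ++ [row]))
    PySem.Dict.empty).items

-- ===== PORT B =====
def group_records_by_run_py_alt (rows : List (List (String × String))) : List (String × List (List (String × String))) :=
  let keys := PySem.List.dedup ((rows.map pvRunId).filter (· != ""))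
  keys.map (fun k => (k, rows.filter (fun r => pvRunId r == k)))

-- ===== PRECONDITION & SPEC =====
def Spec_group_records_by_run_py (rows : List (List (String × String))) (out : List (String × List (List (String × String)))) : Prop := out = group_records_by_run_py_alt rows
instance (rows : List (List (String × String))) (out : List (String × List (List (String × String)))) : Decidable (Spec_group_records_by_run_py rows out) := by unfold Spec_group_records_by_run_py; infer_instance

-- ===== CLAIM (what is proved, stated in full; the proofs are below) =====
def Claim_equal_group_records_by_run_py : Prop := ∀ (rows : List (List (String × String))), Dom_group_records_by_run_py rows → Spec_group_records_by_run_py rows (group_records_by_run_py rows)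

-- ===== LEMMAS AND PROOFS =====

-- the (key, row) pairs A actually inserts, in order
def pvPairs (rows : List (List (String × String))) : List (String × List (String × String)) :=
  rows.filterMap (fun r => if pvRunId r = "" then none else some (pvRunId r, r))

lemma pvFoldA_eq (rows : List (List (String × String)))
    (d : PySem.Dict String (List (List (String × String)))) :
    rows.foldl
      (fun grouped row =>
        let run_id := pvRunId row
        if run_id = "" then grouped
        else grouped.modify run_id [] (· ++ [row])) d
    = (pvPairs rows).foldl (fun d p => d.modify p.1 [] (· ++ [p.2])) d := by
  induction rows generalizing d with
  | nil => rfl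
  | cons r rs ih =>
    simp only [List.foldl_cons, pvPairs, List.filterMap_cons]
    by_cases h : pvRunId r = "" <;> simp [h, ih, pvPairs]

lemma pvPairs_fst (rows : List (List (String × String))) :
    (pvPairs rows).map Prod.fst = (rows.map pvRunId).filter (· != "") := by
  induction rows with
  | nil => rfl
  | cons r rs ih =>
    simp only [pvPairs, List.filterMap_cons, List.map_cons, List.filter_cons]
    by_cases h : pvRunId r = "" <;> simp [h, pvPairs] at ih ⊢ <;> simp [ih]

lemma pvPairs_group (rows : List (List (String × String))) (c : String) (hc : c ≠ "") :
    ((pvPairs rows).filter (fun p => p.1 == c)).map (·.2)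
      = rows.filter (fun r => pvRunId r == c) := by
  induction rows with
  | nil => rfl
  | cons r rs ih =>
    simp only [pvPairs, List.filterMap_cons] at ih ⊢
    by_cases h : pvRunId r = ""
    · have hne : (pvRunId r == c) = false := by
        rw [h]; exact beq_eq_false_iff_ne.mpr fun hh => hc hh.symm
      simp [h, ih, hc]
    · by_cases h2 : pvRunId r = c <;> simp [h, h2, ih, hc]

lemma pvKeys_ne_empty (rows : List (List (String × String))) (k : String)
    (hk : k ∈ PySem.List.dedup ((rows.map pvRunId).filter (· != ""))) : k ≠ "" := by
  have h1 := (PySem.List.mem_dedup _ _).1 hk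
  have h2 := List.of_mem_filter h1
  simpa using h2

theorem group_records_by_run_py_spec : Claim_equal_group_records_by_run_py := by
  intro rows _
  unfold Spec_group_records_by_run_py group_records_by_run_py group_records_by_run_py_alt
  rw [pvFoldA_eq]
  set d := (pvPairs rows).foldl (fun d p => d.modify p.1 [] (· ++ [p.2])) PySem.Dict.empty with hd
  have hnd : d.keys.Nodup := by
    rw [hd]
    exact PySem.Dict.nodup_keys_foldl_modify_key (pvPairs rows) Prod.fst []
      (fun _ p => (· ++ [p.2])) PySem.Dict.empty (by simp)
  have hkeys : d.keys = PySem.List.dedup ((rows.map pvRunId).filter (· != "")) := by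
    rw [hd]
    have := PySem.Dict.keys_foldl_modify_key (l := pvPairs rows) (key := Prod.fst)
      (d0 := []) (f := fun _ p => (· ++ [p.2])) (d := PySem.Dict.empty)
    simp only [PySem.Dict.keys_empty] at this
    rw [this, pvPairs_fst]
    simp [PySem.Set.update_nil_left]
  rw [PySem.Dict.items_eq_map_keys d hnd [], hkeys]
  apply List.map_congr_left
  intro k hk
  have hkne : k ≠ "" := pvKeys_ne_empty rows k hk
  have : d.getD k [] = rows.filter (fun r => pvRunId r == k) := by
    rw [hd, PySem.Dict.getD_foldl_modify_append, PySem.Dict.getD_empty, List.nil_append,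
      pvPairs_group rows k hkne]
  simp [this]

-- ===== VERDICT (by name: the statement is the Claim_ definition above) =====
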